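-- pv_equiv track=rewrite | github.com/GeorgyGogol/Cool-Studient-Portfolio | Python/ProtectedTextEditor/Security.py | UnMergeText
-- ===== SOURCE A (Python) =====
-- def UnMergeText(text, length):
-- 	out1, out2 = "", ""
-- 	L, l1, l2 = len(text), len(text) - length, length
-- 	i, i1, i2 = 0, 0, 0
-- 	while i < L and i2 < l2 and i1 < l1:
-- 		out1 += text[i]
-- 		out2 += text[i + 1]
-- 		i, i1, i2 = i + 2, i1 + 1, i2 + 1
-- 	while i < L and i1 < l1 and i2 >= l2:
-- 		out1 += text[i]
-- 		i, i1 = i + 1, i1 + 1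
-- 	while i < L and i2 < l2 and i1 >= l1:
-- 		out2 += text[i]
-- 		i, i2 = i + 1, i2 + 1
-- 	return out1, out2
-- ===== SOURCE B (Python) =====
-- def UnMergeText(text, length):
--     L = len(text)
--     a, b = L - length, length
--     n = max(0, min(a, b))
--     out1 = ''.join(text[2 * i] for i in range(n))
--     out2 = ''.join(text[2 * i + 1] for i in range(n))
--     tail = text[2 * n:]
--     return (out1 + tail, out2) if a > b else (out1, out2 + tail)
-- ===== Notes on version B (the rewrite author's own statement) =====
-- stated objective: simpler
-- what changed: Replaces A's three sequential index-tracking while loops (with per-character string += accumulation) by a closed-form computation: the number of interleaved pairs n = max(0, min(L-length, length)) gives each part directly as a join over text[2k] / text[2k+1], plus a single tail slice appended to whichever part is longer.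
import Mathlib
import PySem

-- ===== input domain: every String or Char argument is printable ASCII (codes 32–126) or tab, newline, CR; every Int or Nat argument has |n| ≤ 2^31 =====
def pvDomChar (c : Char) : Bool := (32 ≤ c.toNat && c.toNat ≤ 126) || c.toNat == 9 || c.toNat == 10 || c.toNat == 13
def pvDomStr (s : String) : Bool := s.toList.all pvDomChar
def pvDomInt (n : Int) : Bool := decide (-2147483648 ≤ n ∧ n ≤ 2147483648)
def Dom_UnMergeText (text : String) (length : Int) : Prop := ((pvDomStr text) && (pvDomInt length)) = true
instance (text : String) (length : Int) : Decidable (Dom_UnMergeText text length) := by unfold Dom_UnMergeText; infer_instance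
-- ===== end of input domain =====

-- B replaces A's three sequential index-tracking while loops by closed-form index maps
-- (character k of part j is text[2k+j] for the first min(l1,l2) pairs, plus a single tail slice);
-- objective: simpler. Both programs are total; return values only, no mutation.

-- ===== PORT A =====
-- first while loop: interleaved pair phase (text[i] / text[i+1] are in range whenever read; .getD is never the exception path — proved via the loop lemmas below)
def pvLoop1 (cs : List Char) (L l1 l2 : Int) (i i1 i2 : Int) (out1 out2 : List Char) :
    Int × Int × Int × List Char × List Char :=
  if i < L ∧ i2 < l2 ∧ i1 < l1 then
    pvLoop1 cs L l1 l2 (i + 2) (i1 + 1) (i2 + 1)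
      (out1 ++ [PySem.List.pyGetD cs i ' '])
      (out2 ++ [PySem.List.pyGetD cs (i + 1) ' '])
  else (i, i1, i2, out1, out2)
termination_by (L - i).toNat
decreasing_by omega

-- second while loop: remainder goes to out1
def pvLoop2 (cs : List Char) (L l1 l2 : Int) (i i1 i2 : Int) (out1 : List Char) :
    Int × Int × List Char :=
  if i < L ∧ i1 < l1 ∧ l2 ≤ i2 then
    pvLoop2 cs L l1 l2 (i + 1) (i1 + 1) i2 (out1 ++ [PySem.List.pyGetD cs i ' '])
  else (i, i1, out1)
termination_by (L - i).toNat
decreasing_by omega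

-- third while loop: remainder goes to out2
def pvLoop3 (cs : List Char) (L l1 l2 : Int) (i i1 i2 : Int) (out2 : List Char) :
    List Char :=
  if i < L ∧ i2 < l2 ∧ l1 ≤ i1 then
    pvLoop3 cs L l1 l2 (i + 1) i1 (i2 + 1) (out2 ++ [PySem.List.pyGetD cs i ' '])
  else out2
termination_by (L - i).toNat
decreasing_by omega

def UnMergeText (text : String) (length : Int) : String × String :=
  let cs := text.toList
  let L : Int := cs.length
  let l1 : Int := L - length
  let l2 : Int := length
  let (i, i1, i2, out1, out2) := pvLoop1 cs L l1 l2 0 0 0 [] []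
  let (i', i1', out1') := pvLoop2 cs L l1 l2 i i1 i2 out1
  let out2' := pvLoop3 cs L l1 l2 i' i1' i2 out2
  (String.ofList out1', String.ofList out2')

-- ===== PORT B =====
def UnMergeText_alt (text : String) (length : Int) : String × String :=
  let cs := text.toList
  let L : Int := cs.length
  let a : Int := L - length
  let b : Int := length
  let n : Int := max 0 (min a b)
  -- ''.join(text[2*i] for i in range(n)) — text[2*i] (and 2*i+1) always in range: 2n ≤ L
  let out1 := (PySem.List.pyRange 0 n 1).map (fun i => PySem.List.pyGetD cs (2 * i) ' ')
  let out2 := (PySem.List.pyRange 0 n 1).map (fun i => PySem.List.pyGetD cs (2 * i + 1) ' ')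
  let tail := PySem.List.slice cs (some (2 * n)) none
  if a > b then (String.ofList (out1 ++ tail), String.ofList out2)
  else (String.ofList out1, String.ofList (out2 ++ tail))

-- ===== PRECONDITION & SPEC =====
def Spec_UnMergeText (text : String) (length : Int) (out : String × String) : Prop := out = UnMergeText_alt text length
instance (text : String) (length : Int) (out : String × String) : Decidable (Spec_UnMergeText text length out) := by unfold Spec_UnMergeText; infer_instance

-- ===== CLAIM (what is proved, stated in full; the proofs are below) =====
def Claim_equal_UnMergeText : Prop := ∀ (text : String) (length : Int), Dom_UnMergeText text length → Spec_UnMergeText text length (UnMergeText text length)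

-- ===== LEMMAS AND PROOFS =====

-- phase-1 characterisation: with the loop invariants i = i1+i2 and l1+l2 = L = |cs|,
-- the pair loop runs t = (min (l1-i1) (l2-i2)).toNat times and appends the even/odd chars.
theorem pvLoop1_eq (cs : List Char) (L l1 l2 : Int) (hL : L = cs.length) (hsum : l1 + l2 = L) :
    ∀ (t : Nat) (i i1 i2 : Int) (out1 out2 : List Char),
      0 ≤ i → i = i1 + i2 → (min (l1 - i1) (l2 - i2)).toNat = t →
      pvLoop1 cs L l1 l2 i i1 i2 out1 out2 =
        (i + 2 * t, i1 + t, i2 + t,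
         out1 ++ (List.range t).map (fun k => cs.getD (i.toNat + 2 * k) ' '),
         out2 ++ (List.range t).map (fun k => cs.getD (i.toNat + 2 * k + 1) ' ')) := by
  intro t
  induction t with
  | zero =>
    intro i i1 i2 out1 out2 hi hinv hmin
    rw [pvLoop1]
    simp only [if_neg (by omega : ¬ (i < L ∧ i2 < l2 ∧ i1 < l1))]
    simp
  | succ t ih =>
    intro i i1 i2 out1 out2 hi hinv hmin
    have hcond : i < L ∧ i2 < l2 ∧ i1 < l1 := by omega
    rw [pvLoop1, if_pos hcond]
    have hbound : i + 2 * ((t : Int) + 1) ≤ L := by omega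
    have hlt : i.toNat < cs.length := by omega
    have hlt1 : i.toNat + 1 < cs.length := by omega
    rw [ih (i+2) (i1+1) (i2+1) _ _ (by omega) (by omega) (by omega)]
    have hget : PySem.List.pyGetD cs i ' ' = cs.getD i.toNat ' ' := by
      rw [PySem.List.pyGetD_eq_getElem cs ' ' hi (by omega), List.getD_eq_getElem cs ' ' hlt]
    have hget1 : PySem.List.pyGetD cs (i+1) ' ' = cs.getD (i.toNat + 1) ' ' := by
      rw [PySem.List.pyGetD_eq_getElem cs ' ' (by omega) (by omega), List.getD_eq_getElem cs ' ' (by omega)]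
      congr 1
      omega
    simp only [Prod.mk.injEq]
    refine ⟨by omega, by omega, by omega, ?_, ?_⟩
    · rw [hget, List.range_succ_eq_map, List.map_cons, List.map_map, List.append_assoc]
      simp only [Nat.add_zero, Nat.mul_zero, List.singleton_append]
      congr 2
      apply List.map_congr_left
      intro k _
      simp only [Function.comp_apply]
      congr 1
      omega
    · rw [hget1, List.range_succ_eq_map, List.map_cons, List.map_map, List.append_assoc]
      simp only [Nat.add_zero, Nat.mul_zero, List.singleton_append]
      congr 2
      apply List.map_congr_left
      intro k _
      simp only [Function.comp_apply]
      congr 1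
      omega

theorem pvLoop2_eq (cs : List Char) (L l1 l2 : Int) (hL : L = cs.length) :
    ∀ (u : Nat) (i i1 i2 : Int) (out1 : List Char),
      0 ≤ i → l2 ≤ i2 → (min (L - i) (l1 - i1)).toNat = u →
      pvLoop2 cs L l1 l2 i i1 i2 out1 =
        (i + u, i1 + u, out1 ++ (cs.drop i.toNat).take u) := by
  intro u
  induction u with
  | zero =>
    intro i i1 i2 out1 hi hl2 hmin
    rw [pvLoop2]
    simp only [if_neg (by omega : ¬ (i < L ∧ i1 < l1 ∧ l2 ≤ i2))]
    simp
  | succ u ih =>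
    intro i i1 i2 out1 hi hl2 hmin
    have hcond : i < L ∧ i1 < l1 ∧ l2 ≤ i2 := by omega
    rw [pvLoop2, if_pos hcond]
    have hlt : i.toNat < cs.length := by omega
    rw [ih (i+1) (i1+1) i2 _ (by omega) hl2 (by omega)]
    have hdrop : cs.drop i.toNat = cs[i.toNat] :: cs.drop (i.toNat + 1) :=
      List.drop_eq_getElem_cons hlt
    have hget : PySem.List.pyGetD cs i ' ' = cs[i.toNat]'hlt := by
      rw [PySem.List.pyGetD_eq_getElem cs ' ' hi (by omega)]
    have hnat : (i+1).toNat = i.toNat + 1 := by omega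
    simp only [Prod.mk.injEq]
    refine ⟨by omega, by omega, ?_⟩
    rw [hget, hnat, hdrop, List.take_succ_cons, List.append_assoc]
    simp

theorem pvLoop2_stop (cs : List Char) (L l1 l2 : Int) (i i1 i2 : Int) (out1 : List Char)
    (h : l1 ≤ i1) : pvLoop2 cs L l1 l2 i i1 i2 out1 = (i, i1, out1) := by
  rw [pvLoop2]
  simp only [if_neg (by omega : ¬ (i < L ∧ i1 < l1 ∧ l2 ≤ i2))]

theorem pvLoop3_eq (cs : List Char) (L l1 l2 : Int) (hL : L = cs.length) :
    ∀ (v : Nat) (i i1 i2 : Int) (out2 : List Char),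
      0 ≤ i → l1 ≤ i1 → (min (L - i) (l2 - i2)).toNat = v →
      pvLoop3 cs L l1 l2 i i1 i2 out2 = out2 ++ (cs.drop i.toNat).take v := by
  intro v
  induction v with
  | zero =>
    intro i i1 i2 out2 hi hl1 hmin
    rw [pvLoop3]
    simp only [if_neg (by omega : ¬ (i < L ∧ i2 < l2 ∧ l1 ≤ i1))]
    simp
  | succ v ih =>
    intro i i1 i2 out2 hi hl1 hmin
    have hcond : i < L ∧ i2 < l2 ∧ l1 ≤ i1 := by omega
    rw [pvLoop3, if_pos hcond]
    have hlt : i.toNat < cs.length := by omega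
    rw [ih (i+1) i1 (i2+1) _ (by omega) hl1 (by omega)]
    have hdrop : cs.drop i.toNat = cs[i.toNat] :: cs.drop (i.toNat + 1) :=
      List.drop_eq_getElem_cons hlt
    have hget : PySem.List.pyGetD cs i ' ' = cs[i.toNat]'hlt := by
      rw [PySem.List.pyGetD_eq_getElem cs ' ' hi (by omega)]
    have hnat : (i+1).toNat = i.toNat + 1 := by omega
    rw [hget, hnat, hdrop, List.take_succ_cons, List.append_assoc]
    simp

theorem pvLoop3_stop (cs : List Char) (L l1 l2 : Int) (i i1 i2 : Int) (out2 : List Char)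
    (h : l2 ≤ i2) : pvLoop3 cs L l1 l2 i i1 i2 out2 = out2 := by
  rw [pvLoop3]
  simp only [if_neg (by omega : ¬ (i < L ∧ i2 < l2 ∧ l1 ≤ i1))]

-- bridge: B's comprehension over pyRange equals the canonical List.range map form
theorem pvBridge1 (cs : List Char) (n : Int) (hn : 0 ≤ n) :
    (PySem.List.pyRange 0 n 1).map (fun i => PySem.List.pyGetD cs (2 * i) ' ')
      = (List.range n.toNat).map (fun k => cs.getD (2 * k) ' ') := by
  rw [PySem.List.pyRange_one, List.map_map]
  have hnn : (n - 0).toNat = n.toNat := by omega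
  rw [hnn]
  apply List.map_congr_left
  intro k _
  simp only [Function.comp_apply]
  have h : (2 : Int) * (0 + (k : Int)) = ((2 * k : Nat) : Int) := by push_cast; ring
  rw [h, PySem.List.pyGetD_natCast]

theorem pvBridge2 (cs : List Char) (n : Int) (hn : 0 ≤ n) :
    (PySem.List.pyRange 0 n 1).map (fun i => PySem.List.pyGetD cs (2 * i + 1) ' ')
      = (List.range n.toNat).map (fun k => cs.getD (2 * k + 1) ' ') := by
  rw [PySem.List.pyRange_one, List.map_map]
  have hnn : (n - 0).toNat = n.toNat := by omega
  rw [hnn]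
  apply List.map_congr_left
  intro k _
  simp only [Function.comp_apply]
  have h : (2 : Int) * (0 + (k : Int)) + 1 = ((2 * k + 1 : Nat) : Int) := by push_cast; ring
  rw [h, PySem.List.pyGetD_natCast]

-- ===== VERDICT (by name: the statement is the Claim_ definition above) =====
theorem UnMergeText_spec : Claim_equal_UnMergeText := by
  unfold Claim_equal_UnMergeText
  intro text length _
  unfold Spec_UnMergeText UnMergeText UnMergeText_alt
  dsimp only
  set cs := text.toList with hcs
  set n : Int := max 0 (min ((cs.length : Int) - length) length) with hn
  have hn0 : 0 ≤ n := by omega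
  rw [pvLoop1_eq cs (cs.length : Int) ((cs.length : Int) - length) length rfl (by ring)
      n.toNat 0 0 0 [] [] le_rfl (by ring) (by omega)]
  simp only [Int.toNat_zero, Nat.zero_add, List.nil_append]
  have e1 : (0 : Int) + 2 * (n.toNat : Int) = 2 * n := by omega
  have e2 : (0 : Int) + (n.toNat : Int) = n := by omega
  rw [e1, e2]
  rw [pvBridge1 cs n hn0, pvBridge2 cs n hn0,
      PySem.List.slice_from cs (by omega : (0 : Int) ≤ 2 * n)]
  by_cases hab : (cs.length : Int) - length > length
  · rw [pvLoop2_eq cs (cs.length : Int) ((cs.length : Int) - length) length rfl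
        ((min ((cs.length : Int) - 2 * n) (((cs.length : Int) - length) - n)).toNat)
        (2 * n) n n _ (by omega) (by omega) rfl]
    rw [pvLoop3_stop cs (cs.length : Int) ((cs.length : Int) - length) length
        _ _ _ _ (by omega : length ≤ n)]
    rw [if_pos hab]
    rw [List.take_of_length_le (by rw [List.length_drop]; omega)]
  · rw [pvLoop2_stop cs (cs.length : Int) ((cs.length : Int) - length) length
        _ _ _ _ (by omega : (cs.length : Int) - length ≤ n)]
    rw [pvLoop3_eq cs (cs.length : Int) ((cs.length : Int) - length) length rfl
        ((min ((cs.length : Int) - 2 * n) (length - n)).toNat)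
        (2 * n) n n _ (by omega) (by omega) rfl]
    rw [if_neg hab]
    rw [List.take_of_length_le (by rw [List.length_drop]; omega)]
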